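-- pv_equiv track=rewrite | github.com/sweetykr7/playGround | Stock_Trading_Bot/subindex/subindex/subindex_20210913.py | bband_overcome
-- ===== SOURCE A (Python) =====
-- def bband_overcome(period, th_close, th_BBAND_U):
--     bband_overcome_list = []
--     confirm_overcome=0
--     bband_overcome_gap=0
--     for i in range(len(th_close)):
--         if i < period-1:
--             bband_overcome_list.append(0)
--         else:
--             for j in range(period):
--                 if th_close[i-period+1+j] > th_BBAND_U[i-period+1+j]:
--                     confirm_overcome=1
--                     bband_overcome_gap=period-j
--             if confirm_overcome==1:
--                 bband_overcome_list.append(bband_overcome_gap)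
--             else:
--                 bband_overcome_list.append(0)
--
--         confirm_overcome=0
--
--
--     return bband_overcome_list
-- ===== SOURCE B (Python) =====
-- def bband_overcome(period, th_close, th_BBAND_U):
--     n = len(th_close)
--     if period < 1 or period > n:
--         return [0] * n
--     out = []
--     last = -1  # most recent index where close broke above the upper band
--     for i, (c, u) in enumerate(zip(th_close, th_BBAND_U)):
--         if c > u:
--             last = i
--         if i >= period - 1 and last >= i - period + 1:
--             out.append(i - last + 1)
--         else:
--             out.append(0)
--     return out
-- ===== Notes on version B (the rewrite author's own statement) =====
-- stated objective: faster
-- what changed: A rescans the whole period-length window for every index (and only reads the break-above flag from it); B makes a single pass that tracks the most recent index where close broke above the upper band and emits i-last+1 when that index is still inside the window.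
import Mathlib
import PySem

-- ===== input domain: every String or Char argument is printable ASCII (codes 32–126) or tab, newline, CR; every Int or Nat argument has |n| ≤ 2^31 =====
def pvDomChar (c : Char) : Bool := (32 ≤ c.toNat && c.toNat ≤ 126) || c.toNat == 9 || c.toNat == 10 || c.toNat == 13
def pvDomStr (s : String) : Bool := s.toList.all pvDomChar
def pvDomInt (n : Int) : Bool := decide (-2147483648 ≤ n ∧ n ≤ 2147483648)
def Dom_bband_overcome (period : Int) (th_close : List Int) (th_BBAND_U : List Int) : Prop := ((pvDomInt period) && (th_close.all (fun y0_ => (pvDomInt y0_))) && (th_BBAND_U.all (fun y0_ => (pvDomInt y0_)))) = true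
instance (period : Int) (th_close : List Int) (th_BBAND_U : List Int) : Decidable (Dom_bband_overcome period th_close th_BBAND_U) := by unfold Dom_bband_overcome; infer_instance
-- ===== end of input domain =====

-- B replaces A's O(n·period) rescan of every window by a single pass that tracks the
-- most recent band-overcome index (objective: faster, asymptotic).

-- ===== PORT A =====
def bband_overcome (period : Int) (th_close : List Int) (th_BBAND_U : List Int) : List Int :=
  ((PySem.List.pyRange 0 (th_close.length : Int)).foldl
    (fun (st : List Int × Int × Int) (i : Int) =>
      if i < period - 1 then
        (st.1 ++ [0], 0, st.2.2)
      else
        let inner := (PySem.List.pyRange 0 period).foldl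
          (fun (cg : Int × Int) (j : Int) =>
            if PySem.List.pyGetD th_close (i - period + 1 + j) 0 >
               PySem.List.pyGetD th_BBAND_U (i - period + 1 + j) 0
            then (1, period - j) else cg) (st.2.1, st.2.2)
        if inner.1 = 1 then (st.1 ++ [inner.2], 0, inner.2)
        else (st.1 ++ [0], 0, inner.2))
    ([], 0, 0)).1

-- ===== PORT B =====
def bband_overcome_alt (period : Int) (th_close : List Int) (th_BBAND_U : List Int) : List Int :=
  if period < 1 ∨ (th_close.length : Int) < period then
    List.replicate th_close.length 0
  else
    ((PySem.List.enumerate (th_close.zip th_BBAND_U)).foldl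
      (fun (st : List Int × Int) (p : Int × Int × Int) =>
        let last := if p.2.1 > p.2.2 then p.1 else st.2
        if period - 1 ≤ p.1 ∧ p.1 - period + 1 ≤ last then
          (st.1 ++ [p.1 - last + 1], last)
        else (st.1 ++ [0], last))
      ([], -1)).1

-- ===== PRECONDITION & SPEC =====
-- Pre_ excludes exactly the inputs where A raises IndexError: a full window exists
-- (1 ≤ period ≤ len th_close) while th_BBAND_U is shorter than th_close.
def Pre_bband_overcome (period : Int) (th_close : List Int) (th_BBAND_U : List Int) : Prop :=
  (1 ≤ period ∧ period ≤ (th_close.length : Int)) → th_close.length ≤ th_BBAND_U.length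
instance (period : Int) (th_close : List Int) (th_BBAND_U : List Int) : Decidable (Pre_bband_overcome period th_close th_BBAND_U) := by unfold Pre_bband_overcome; infer_instance

def pvWitness_bband_overcome : Int × List Int × List Int := (2, [1, 5, 2], [3, 3, 3])

def Spec_bband_overcome (period : Int) (th_close : List Int) (th_BBAND_U : List Int) (out : List Int) : Prop := out = bband_overcome_alt period th_close th_BBAND_U
instance (period : Int) (th_close : List Int) (th_BBAND_U : List Int) (out : List Int) : Decidable (Spec_bband_overcome period th_close th_BBAND_U out) := by unfold Spec_bband_overcome; infer_instance

-- ===== CLAIM (what is proved, stated in full; the proofs are below) =====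
def Claim_equal_bband_overcome : Prop := ∀ (period : Int) (th_close : List Int) (th_BBAND_U : List Int), Dom_bband_overcome period th_close th_BBAND_U → Pre_bband_overcome period th_close th_BBAND_U → Spec_bband_overcome period th_close th_BBAND_U (bband_overcome period th_close th_BBAND_U)

-- ===== LEMMAS AND PROOFS =====

-- A's outer-loop step function (proof-side name for the lambda in the port).
def stepA (period : Int) (tc tb : List Int) (st : List Int × Int × Int) (i : Int) : List Int × Int × Int :=
  if i < period - 1 then
    (st.1 ++ [0], 0, st.2.2)
  else
    let inner := (PySem.List.pyRange 0 period).foldl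
      (fun (cg : Int × Int) (j : Int) =>
        if PySem.List.pyGetD tc (i - period + 1 + j) 0 >
           PySem.List.pyGetD tb (i - period + 1 + j) 0
        then (1, period - j) else cg) (st.2.1, st.2.2)
    if inner.1 = 1 then (st.1 ++ [inner.2], 0, inner.2)
    else (st.1 ++ [0], 0, inner.2)

-- B's loop step function on unpacked (index, close, band) triples
-- (the port's `let last := …` written inline; definitionally equal).
def stepB (period : Int) (st : List Int × Int) (p : Int × Int × Int) : List Int × Int :=
  if period - 1 ≤ p.1 ∧ p.1 - period + 1 ≤ (if p.2.1 > p.2.2 then p.1 else st.2) then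
    (st.1 ++ [p.1 - (if p.2.1 > p.2.2 then p.1 else st.2) + 1], if p.2.1 > p.2.2 then p.1 else st.2)
  else (st.1 ++ [0], if p.2.1 > p.2.2 then p.1 else st.2)

lemma bband_A_eq (period : Int) (tc tb : List Int) :
    bband_overcome period tc tb
      = ((PySem.List.pyRange 0 (tc.length : Int)).foldl (stepA period tc tb) ([], 0, 0)).1 := rfl

lemma bband_B_eq (period : Int) (tc tb : List Int) (h : ¬(period < 1 ∨ (tc.length : Int) < period)) :
    bband_overcome_alt period tc tb
      = ((PySem.List.enumerate (tc.zip tb)).foldl (stepB period) ([], -1)).1 := by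
  unfold bband_overcome_alt
  rw [if_neg h]
  rfl

-- "last index k in ks with close[k] > band[k], else l" fold.
def lastIn (tc tb : List Int) (ks : List Int) (l : Int) : Int :=
  ks.foldl (fun m k => if PySem.List.pyGetD tc k 0 > PySem.List.pyGetD tb k 0 then k else m) l

lemma lastIn_singleton (tc tb : List Int) (x l : Int) :
    lastIn tc tb [x] l
      = if PySem.List.pyGetD tc x 0 > PySem.List.pyGetD tb x 0 then x else l := rfl

lemma lastIn_append (tc tb : List Int) (ks ks' : List Int) (l : Int) :
    lastIn tc tb (ks ++ ks') l = lastIn tc tb ks' (lastIn tc tb ks l) := by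
  simp [lastIn, List.foldl_append]

lemma lastIn_mem (tc tb : List Int) (ks : List Int) (l : Int) :
    lastIn tc tb ks l = l ∨ lastIn tc tb ks l ∈ ks := by
  induction ks generalizing l with
  | nil => exact Or.inl rfl
  | cons k t ih =>
    simp only [lastIn, List.foldl_cons]
    by_cases h : PySem.List.pyGetD tc k 0 > PySem.List.pyGetD tb k 0
    · simp only [if_pos h]
      rcases ih k with h' | h'
      · exact Or.inr (by simp only [lastIn] at h' ⊢; simp [h'])
      · exact Or.inr (List.mem_cons_of_mem _ h')
    · simp only [if_neg h]
      rcases ih l with h' | h'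
      · exact Or.inl h'
      · exact Or.inr (List.mem_cons_of_mem _ h')

-- Characterisation of A's inner window scan as a "last hit" fold.
lemma inner_char (tc tb : List Int) (h : Int → Int) :
    ∀ (ks : List Int) (c g l : Int), ks.Pairwise (· < ·) → (∀ k ∈ ks, l < k) →
    ks.foldl (fun (s : Int × Int) k =>
        if PySem.List.pyGetD tc k 0 > PySem.List.pyGetD tb k 0 then (1, h k) else s) (c, g)
      = if lastIn tc tb ks l = l then (c, g) else (1, h (lastIn tc tb ks l)) := by
  intro ks
  induction ks with
  | nil => intro c g l _ _; simp [lastIn]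
  | cons k t ih =>
    intro c g l hp hl
    have hpt : t.Pairwise (· < ·) := hp.of_cons
    have hkt : ∀ m ∈ t, k < m := fun m hm => (List.pairwise_cons.mp hp).1 m hm
    simp only [List.foldl_cons, lastIn, List.foldl_cons] at *
    by_cases hk : PySem.List.pyGetD tc k 0 > PySem.List.pyGetD tb k 0
    · simp only [if_pos hk]
      have := ih 1 (h k) k hpt hkt
      rw [this]
      have hlk : l < k := hl k (List.mem_cons_self)
      rcases lastIn_mem tc tb t k with h' | h'
      · simp only [lastIn] at h'
        rw [h']
        have : k ≠ l := by omega
        simp [this]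
      · have h1 : lastIn tc tb t k ≠ l := by
          have := hkt _ h'
          simp only [lastIn] at *
          omega
        have h2 : lastIn tc tb t k ≠ k := by
          have := hkt _ h'
          simp only [lastIn] at *
          omega
        simp only [lastIn] at *
        rw [if_neg h1]
        rw [if_neg h2]
    · simp only [if_neg hk]
      exact ih c g l hpt (fun m hm => hl m (List.mem_cons_of_mem _ hm))

-- A's inner scan (indexed by j) rewritten over the window's absolute indices.
lemma inner_window (period : Int) (tc tb : List Int) (i : Int) (c g : Int) (hp : 1 ≤ period) :
    (PySem.List.pyRange 0 period).foldl
      (fun (cg : Int × Int) (j : Int) =>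
        if PySem.List.pyGetD tc (i - period + 1 + j) 0 >
           PySem.List.pyGetD tb (i - period + 1 + j) 0
        then (1, period - j) else cg) (c, g)
      = (PySem.List.pyRange (i - period + 1) (i + 1)).foldl
        (fun (s : Int × Int) k =>
          if PySem.List.pyGetD tc k 0 > PySem.List.pyGetD tb k 0 then (1, i - k + 1) else s) (c, g) := by
  rw [PySem.List.pyRange_one 0 period, PySem.List.pyRange_one (i - period + 1) (i + 1)]
  rw [List.foldl_map, List.foldl_map]
  have hlen : (period - 0).toNat = (i + 1 - (i - period + 1)).toNat := by omega
  rw [hlen]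
  apply PySem.List.foldl_congr_mem
  intro acc x _
  have h1 : i - period + 1 + (0 + (x : Int)) = i - period + 1 + x := by ring
  have h2 : period - (0 + (x : Int)) = i - (i - period + 1 + x) + 1 := by ring
  rw [h1, h2]

-- Main invariant: on [0, m) both loops build the same list; A's confirm is 0,
-- B's accumulator is the last overcome index so far (or -1).
lemma main_inv (period : Int) (tc tb : List Int) (hp : 1 ≤ period) :
    ∀ m : Nat, m ≤ tc.length → ∃ out g,
      (PySem.List.pyRange 0 (m : Int)).foldl (stepA period tc tb) ([], 0, 0) = (out, 0, g) ∧
      (PySem.List.pyRange 0 (m : Int)).foldl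
        (fun (st : List Int × Int) (j : Int) =>
          stepB period st (j, PySem.List.pyGetD tc j 0, PySem.List.pyGetD tb j 0)) ([], -1)
        = (out, lastIn tc tb (PySem.List.pyRange 0 (m : Int)) (-1)) := by
  intro m
  induction m with
  | zero => exact fun _ => ⟨[], 0, by simp [PySem.List.pyRange_one_eq_nil (le_refl (0:Int)), lastIn]⟩
  | succ m ih =>
    intro hm
    obtain ⟨out, g, hA, hB⟩ := ih (Nat.le_of_succ_le hm)
    have hcast : ((m + 1 : Nat) : Int) = (m : Int) + 1 := by omega
    have hsplit : PySem.List.pyRange 0 ((m + 1 : Nat) : Int)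
        = PySem.List.pyRange 0 (m : Int) ++ [(m : Int)] := by
      rw [hcast]; exact PySem.List.pyRange_one_succ_right (by positivity)
    rw [hsplit, List.foldl_append, List.foldl_append, hA, hB, lastIn_append, lastIn_singleton]
    simp only [List.foldl_cons, List.foldl_nil]
    set last' : Int := lastIn tc tb (PySem.List.pyRange 0 ((m:Int))) (-1) with hlast'
    set Lnew : Int := if PySem.List.pyGetD tc (m:Int) 0 > PySem.List.pyGetD tb (m:Int) 0
        then (m:Int) else last' with hLnew
    by_cases hbr : (m : Int) < period - 1
    · -- no full window yet: both append 0
      refine ⟨out ++ [0], g, ?_, ?_⟩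
      · simp only [stepA, if_pos hbr]
      · have hcond : ¬(period - 1 ≤ (m:Int) ∧ (m:Int) - period + 1 ≤ Lnew) := by
          intro hc; omega
        simp only [stepB]
        rw [if_neg hcond]
    · -- full window: use the window characterisation
      have hge : period - 1 ≤ (m : Int) := by omega
      set l0 : Int := lastIn tc tb (PySem.List.pyRange 0 ((m:Int) - period + 1)) (-1) with hl0
      have hl0lt : l0 < (m:Int) - period + 1 := by
        rcases lastIn_mem tc tb (PySem.List.pyRange 0 ((m:Int) - period + 1)) (-1) with h' | h'
        · rw [← hl0] at h'; omega
        · rw [← hl0] at h'; exact (PySem.List.mem_pyRange_one.mp h').2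
      set L : Int := lastIn tc tb (PySem.List.pyRange ((m:Int) - period + 1) ((m:Int) + 1)) l0 with hL
      have hLrw : Lnew = L := by
        rw [hLnew, hL,
          show PySem.List.pyRange ((m:Int) - period + 1) ((m:Int) + 1)
              = PySem.List.pyRange ((m:Int) - period + 1) (m:Int) ++ [(m:Int)] from
            PySem.List.pyRange_one_succ_right (by omega),
          lastIn_append, lastIn_singleton]
        congr 1
        rw [hlast',
          PySem.List.pyRange_one_append 0 ((m:Int) - period + 1) (m:Int) (by omega) (by omega),
          lastIn_append, ← hl0]
      have hwin : (PySem.List.pyRange 0 period).foldl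
          (fun (cg : Int × Int) (j : Int) =>
            if PySem.List.pyGetD tc ((m:Int) - period + 1 + j) 0 >
               PySem.List.pyGetD tb ((m:Int) - period + 1 + j) 0
            then (1, period - j) else cg) (0, g)
          = if L = l0 then ((0:Int), g) else (1, (m:Int) - L + 1) := by
        rw [inner_window period tc tb (m:Int) 0 g hp]
        rw [inner_char tc tb (fun k => (m:Int) - k + 1)
          (PySem.List.pyRange ((m:Int) - period + 1) ((m:Int) + 1)) 0 g l0
          (PySem.List.pairwise_lt_pyRange_one _ _)
          (fun k hk => by have := (PySem.List.mem_pyRange_one.mp hk).1; omega)]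
      by_cases hLl : L = l0
      · -- no overcome in the window: both append 0
        refine ⟨out ++ [0], g, ?_, ?_⟩
        · simp only [stepA, if_neg (by omega : ¬((m:Int) < period - 1))]
          simp only [hwin, if_pos hLl]
          norm_num
        · have hcond : ¬(period - 1 ≤ (m:Int) ∧ (m:Int) - period + 1 ≤ Lnew) := by
            rw [hLrw, hLl]; intro hc; omega
          simp only [stepB]
          rw [if_neg hcond]
      · -- overcome in the window at index L: both append m - L + 1
        have hLmem : L ∈ PySem.List.pyRange ((m:Int) - period + 1) ((m:Int) + 1) := by
          rcases lastIn_mem tc tb (PySem.List.pyRange ((m:Int) - period + 1) ((m:Int) + 1)) l0 with h' | h'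
          · rw [← hL] at h'; exact absurd h' hLl
          · rw [← hL] at h'; exact h'
        have hLge : (m:Int) - period + 1 ≤ L := (PySem.List.mem_pyRange_one.mp hLmem).1
        refine ⟨out ++ [(m:Int) - L + 1], (m:Int) - L + 1, ?_, ?_⟩
        · simp only [stepA, if_neg (by omega : ¬((m:Int) < period - 1))]
          simp only [hwin, if_neg hLl]
          norm_num
        · have hcond : period - 1 ≤ (m:Int) ∧ (m:Int) - period + 1 ≤ Lnew := by
            rw [hLrw]; exact ⟨hge, hLge⟩
          simp only [stepB]
          rw [if_pos hcond, ← hLnew, hLrw]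

-- Degenerate case: no full window ever exists, A appends 0 at every index.
lemma zero_case (period : Int) (tc tb : List Int)
    (h : period < 1 ∨ (tc.length : Int) < period) :
    ∀ m : Nat, m ≤ tc.length →
      (PySem.List.pyRange 0 (m : Int)).foldl (stepA period tc tb) ([], 0, 0)
        = (List.replicate m 0, 0, 0) := by
  intro m
  induction m with
  | zero => intro _; simp [PySem.List.pyRange_one_eq_nil (le_refl (0:Int))]
  | succ m ih =>
    intro hm
    have hcast : ((m + 1 : Nat) : Int) = (m : Int) + 1 := by omega
    have hsplit : PySem.List.pyRange 0 ((m + 1 : Nat) : Int)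
        = PySem.List.pyRange 0 (m : Int) ++ [(m : Int)] := by
      rw [hcast]; exact PySem.List.pyRange_one_succ_right (by positivity)
    rw [hsplit, List.foldl_append, ih (Nat.le_of_succ_le hm)]
    simp only [List.foldl_cons, List.foldl_nil]
    rcases h with h | h
    · have hbr : ¬((m:Int) < period - 1) := by omega
      have hinner : PySem.List.pyRange 0 period = [] :=
        PySem.List.pyRange_one_eq_nil (by omega)
      simp [stepA, hbr, hinner, List.replicate_succ']
    · have hbr : (m:Int) < period - 1 := by
        have : m + 1 ≤ tc.length := hm
        omega
      simp [stepA, hbr, List.replicate_succ']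

-- B's fold over enumerate(zip) as a fold over indices.
lemma B_fold_index (period : Int) (tc tb : List Int) (hlen : tc.length ≤ tb.length) :
    (PySem.List.enumerate (tc.zip tb)).foldl (stepB period) ([], -1)
      = (PySem.List.pyRange 0 ((tc.length : Nat) : Int)).foldl
        (fun (st : List Int × Int) (j : Int) =>
          stepB period st (j, PySem.List.pyGetD tc j 0, PySem.List.pyGetD tb j 0)) ([], -1) := by
  rw [PySem.List.enumerate_eq_map_pyRange (tc.zip tb) (0, 0), List.foldl_map]
  have hzlen : (tc.zip tb).length = tc.length := by
    simp [List.length_zip]; omega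
  rw [show PySem.List.len (tc.zip tb) = ((tc.length : Nat) : Int) by simp [PySem.List.len_eq, hzlen]]
  apply PySem.List.foldl_congr_mem
  intro acc j hj
  obtain ⟨hj0, hj1⟩ := PySem.List.mem_pyRange_one.mp hj
  have hjlt : j.toNat < tc.length := by omega
  have hz : PySem.List.pyGetD (tc.zip tb) j (0, 0)
      = (PySem.List.pyGetD tc j 0, PySem.List.pyGetD tb j 0) := by
    rw [PySem.List.pyGetD_eq_getElem _ _ hj0 (by rw [hzlen]; exact_mod_cast hj1),
      PySem.List.pyGetD_eq_getElem _ _ hj0 (by exact_mod_cast hj1),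
      PySem.List.pyGetD_eq_getElem _ _ hj0 (by omega)]
    exact List.getElem_zip
  rw [hz]

-- ===== VERDICT (by name: the statement is the Claim_ definition above) =====
theorem bband_overcome_spec : Claim_equal_bband_overcome := by
  intro period tc tb _ hpre
  unfold Spec_bband_overcome
  by_cases h : period < 1 ∨ (tc.length : Int) < period
  · rw [bband_A_eq, zero_case period tc tb h tc.length (le_refl _)]
    unfold bband_overcome_alt
    rw [if_pos h]
  · have hb : tc.length ≤ tb.length := by
      apply hpre; constructor <;> omega
    obtain ⟨out, g, hA, hB⟩ :=
      main_inv period tc tb (by omega) tc.length (le_refl _)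
    rw [bband_A_eq, bband_B_eq period tc tb h, B_fold_index period tc tb hb, hA, hB]
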